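-- pv_equiv track=rewrite | github.com/cdstanford/curiosities | copy-paste/copy-paste.py | tuples_bounded_by
-- ===== SOURCE A (Python) =====
-- def tuples_bounded_by(tup):
--     """
--     Generate all tuples of nonnegative integers where the coordinates are
--     bounded by the given tuple.
--     """
--     if len(tup) == 0:
--         yield ()
--     else:
--         yield from (
--             (head,) + tail
--             for tail in tuples_bounded_by(tup[1:])
--             for head in range(tup[0] + 1)
--         )
-- ===== SOURCE B (Python) =====
-- def tuples_bounded_by(tup):
--     """
--     Generate all tuples of nonnegative integers where the coordinates are
--     bounded by the given tuple.
--     """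
--     sizes = [t + 1 for t in tup]
--     total = 1
--     for s in sizes:
--         total *= max(s, 0)
--     for i in range(total):
--         digits = []
--         k = i
--         for s in sizes:
--             digits.append(k % s)
--             k //= s
--         yield tuple(digits)
-- ===== Notes on version B (the rewrite author's own statement) =====
-- stated objective: alternative
-- what changed: B replaces A's recursive Cartesian-product generator with a mixed-radix counter: it computes the total number of tuples as the product of max(t+1,0) and decodes each index i in range(total) into its digits via i % size and i // size, instead of building products of lists recursively.
import Mathlib
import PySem

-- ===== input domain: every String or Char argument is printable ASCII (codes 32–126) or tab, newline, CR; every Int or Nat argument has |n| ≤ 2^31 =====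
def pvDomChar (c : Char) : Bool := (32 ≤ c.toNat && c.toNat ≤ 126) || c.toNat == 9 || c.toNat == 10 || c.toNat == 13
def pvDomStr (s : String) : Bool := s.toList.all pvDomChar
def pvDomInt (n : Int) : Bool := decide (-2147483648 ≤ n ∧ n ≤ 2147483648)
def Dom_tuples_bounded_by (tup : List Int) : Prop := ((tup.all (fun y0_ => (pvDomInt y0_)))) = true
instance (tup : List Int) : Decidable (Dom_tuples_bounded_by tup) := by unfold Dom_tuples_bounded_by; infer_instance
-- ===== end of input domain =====

-- B replaces A's recursive Cartesian product with a mixed-radix counter: it computes the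
-- total count and decodes each index 0..total-1 into its digits (alternative decomposition).

-- ===== PORT A =====
-- A: if empty yield (); else for tail in recursion on tup[1:], for head in range(tup[0]+1), yield (head,)+tail
def tuples_bounded_by (tup : List Int) : List (List Int) :=
  match tup with
  | [] => [[]]
  | t :: rest =>
      (tuples_bounded_by rest).flatMap (fun tail =>
        (PySem.List.pyRange 0 (t + 1) 1).map (fun head => head :: tail))

-- ===== PORT B =====
-- B: sizes = [t+1 for t in tup]; total = prod(max(s,0)); for i in range(total): decode i digit by digit
-- inner loop "for s in sizes: digits.append(k % s); k //= s" as structural recursion over sizes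
def pbDigits (k : Int) (sizes : List Int) : List Int :=
  match sizes with
  | [] => []
  | s :: rest => PySem.Int.mod k s :: pbDigits (PySem.Int.floordiv k s) rest

def tuples_bounded_by_alt (tup : List Int) : List (List Int) :=
  let sizes := tup.map (fun t => t + 1)
  let total := sizes.foldl (fun acc s => acc * max s 0) 1
  (PySem.List.pyRange 0 total 1).map (fun i => pbDigits i sizes)

-- ===== PRECONDITION & SPEC =====
def Spec_tuples_bounded_by (tup : List Int) (out : List (List Int)) : Prop := out = tuples_bounded_by_alt tup
instance (tup : List Int) (out : List (List Int)) : Decidable (Spec_tuples_bounded_by tup out) := by unfold Spec_tuples_bounded_by; infer_instance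

-- ===== CLAIM (what is proved, stated in full; the proofs are below) =====
def Claim_equal_tuples_bounded_by : Prop := ∀ (tup : List Int), Dom_tuples_bounded_by tup → Spec_tuples_bounded_by tup (tuples_bounded_by tup)

-- ===== LEMMAS AND PROOFS =====

-- the foldl computing `total`, recursively
theorem pbFoldl_mul (sizes : List Int) (c : Int) :
    sizes.foldl (fun acc s => acc * max s 0) c
      = c * sizes.foldl (fun acc s => acc * max s 0) 1 := by
  induction sizes generalizing c with
  | nil => simp
  | cons s rest ih =>
      simp only [List.foldl_cons]
      rw [ih (c * max s 0), ih (1 * max s 0)]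
      ring

theorem pbTotal_nonneg (sizes : List Int) :
    0 ≤ sizes.foldl (fun acc s => acc * max s 0) 1 := by
  induction sizes with
  | nil => simp
  | cons s rest ih =>
      simp only [List.foldl_cons, one_mul]
      rw [pbFoldl_mul]
      exact mul_nonneg (le_max_right s 0) ih

-- splitting range(0, s*n) into n blocks of s
theorem pbRange_mul {α : Type} (s : Int) (hs : 0 < s) (n : Nat) (g : Int → α) :
    (PySem.List.pyRange 0 (s * n) 1).map g
      = (PySem.List.pyRange 0 (n : Int) 1).flatMap
          (fun q => (PySem.List.pyRange 0 s 1).map (fun h => g (q * s + h))) := by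
  induction n with
  | zero => simp [PySem.List.pyRange_one_eq_nil]
  | succ m ih =>
      have h1 : (0 : Int) ≤ s * m := mul_nonneg (le_of_lt hs) (by positivity)
      have h2 : s * m ≤ s * (m + 1 : Nat) := by push_cast; nlinarith
      rw [show ((m + 1 : Nat) : Int) = (m : Int) + 1 by push_cast; ring] at h2 ⊢
      rw [PySem.List.pyRange_one_append 0 (s * m) (s * ((m : Int) + 1)) h1 (by linarith),
          PySem.List.pyRange_one_succ_right (by positivity),
          List.map_append, List.flatMap_append, ih]
      congr 1
      simp only [List.flatMap_cons, List.flatMap_nil, List.append_nil]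
      rw [PySem.List.pyRange_one (s * m) (s * ((m : Int) + 1)), PySem.List.pyRange_one 0 s,
          List.map_map, List.map_map]
      have : s * ((m : Int) + 1) - s * m = s - 0 := by ring
      rw [this]
      apply List.map_congr_left
      intro k _
      simp only [Function.comp_apply]
      congr 1
      ring

theorem pbFloordiv_decode (s q h : Int) (hs : 0 < s) (h0 : 0 ≤ h) (h1 : h < s) :
    PySem.Int.floordiv (q * s + h) s = q ∧ PySem.Int.mod (q * s + h) s = h := by
  have hd : PySem.Int.floordiv (q * s + h) s = q := by
    rw [PySem.Int.floordiv_eq_iff_of_pos hs]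
    constructor <;> nlinarith
  refine ⟨hd, ?_⟩
  have := PySem.Int.floordiv_mul_add_mod (q * s + h) s
  rw [hd] at this
  linarith

theorem tuples_bounded_by_alt_eq (tup : List Int) :
    tuples_bounded_by_alt tup = tuples_bounded_by tup := by
  induction tup with
  | nil => rfl
  | cons t rest ih =>
      simp only [tuples_bounded_by_alt, tuples_bounded_by, List.map_cons, List.foldl_cons,
        one_mul] at *
      rw [pbFoldl_mul] at *
      rw [one_mul] at *
      set T := (rest.map (fun t => t + 1)).foldl (fun acc s => acc * max s 0) 1 with hT
      have hTnn : 0 ≤ T := pbTotal_nonneg _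
      by_cases hpos : 0 < t + 1
      · have hmax : max (t + 1) 0 = t + 1 := max_eq_left (le_of_lt hpos)
        rw [hmax]
        have hTn : T = ((T.toNat : Nat) : Int) := (Int.toNat_of_nonneg hTnn).symm
        rw [hTn, pbRange_mul (t + 1) hpos T.toNat, ← hTn, ← ih]
        rw [List.flatMap_map]
        apply List.flatMap_congr
        intro q _
        apply List.map_congr_left
        intro h hh
        rw [PySem.List.mem_pyRange_one] at hh
        obtain ⟨hd, hm⟩ := pbFloordiv_decode (t + 1) q h hpos hh.1 hh.2
        simp only [pbDigits, hd, hm]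
      · have hmax : max (t + 1) 0 = 0 := max_eq_right (by linarith)
        rw [hmax, zero_mul]
        rw [PySem.List.pyRange_one_eq_nil (le_refl 0),
            PySem.List.pyRange_one_eq_nil (by linarith : t + 1 ≤ 0)]
        simp

-- ===== VERDICT (by name: the statement is the Claim_ definition above) =====
theorem tuples_bounded_by_spec : Claim_equal_tuples_bounded_by := by
  intro tup _
  unfold Spec_tuples_bounded_by
  exact (tuples_bounded_by_alt_eq tup).symm
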